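-- pv_equiv track=rewrite | github.com/bohdanyast/lab4 | CollectionApp.py | operations_with_bytes_for_not
-- ===== SOURCE A (Python) =====
-- def collection_into_bytes(u_coll, a_coll):
--     byte = ''
--     for elem in u_coll:
--         if elem in a_coll:
--             byte += '1'
--         else:
--             byte += '0'
--     return byte
--
-- def operations_with_bytes_for_not(u_coll, a_coll, b_coll, collection):
--     total = ''
--     bytes_in_a = collection_into_bytes(u_coll, a_coll)
--     bytes_in_b = collection_into_bytes(u_coll, b_coll)
--     if collection == 'a':
--         for i in range(len(bytes_in_a)):
--             total += str(int(not int(bytes_in_a[i])))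
--     elif collection == 'b':
--         for j in range(len(bytes_in_b)):
--             total += str(int(not int(bytes_in_b[j])))
--
--     return total
-- ===== SOURCE B (Python) =====
-- def operations_with_bytes_for_not(u_coll, a_coll, b_coll, collection):
--     if collection == 'a':
--         chosen = a_coll
--     elif collection == 'b':
--         chosen = b_coll
--     else:
--         return ''
--     return ''.join('0' if elem in chosen else '1' for elem in u_coll)
-- ===== Notes on version B (the rewrite author's own statement) =====
-- stated objective: simpler
-- what changed: B selects the target collection first and emits the negated membership bit per element in one direct pass via ''.join, instead of A's three-pass shape that builds membership bit-strings for both collections with quadratic '+=' concatenation and then re-parses each char back to int to negate it.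
import Mathlib
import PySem

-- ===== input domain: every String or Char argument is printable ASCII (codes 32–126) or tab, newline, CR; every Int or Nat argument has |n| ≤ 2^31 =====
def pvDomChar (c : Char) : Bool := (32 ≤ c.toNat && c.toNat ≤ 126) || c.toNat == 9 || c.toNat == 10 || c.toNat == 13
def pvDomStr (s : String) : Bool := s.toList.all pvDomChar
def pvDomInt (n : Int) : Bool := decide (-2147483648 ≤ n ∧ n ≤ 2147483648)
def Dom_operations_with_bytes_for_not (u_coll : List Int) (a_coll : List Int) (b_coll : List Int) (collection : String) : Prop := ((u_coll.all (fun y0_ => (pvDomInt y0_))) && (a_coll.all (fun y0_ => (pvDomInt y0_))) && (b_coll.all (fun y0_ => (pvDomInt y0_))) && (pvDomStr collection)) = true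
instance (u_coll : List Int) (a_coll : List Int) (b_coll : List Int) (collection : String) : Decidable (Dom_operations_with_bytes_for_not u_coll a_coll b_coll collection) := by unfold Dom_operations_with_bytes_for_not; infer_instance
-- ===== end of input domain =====

-- ===== PORT A =====
-- B changes the decomposition: choose the collection once and emit the negated bit in one pass (objective: simpler).
-- helper: Python collection_into_bytes, returning the bit characters (string ported as its char list)
def collection_into_bytes (u_coll : List Int) (a_coll : List Int) : List Char :=
  u_coll.foldl (fun byte elem => byte ++ [if a_coll.contains elem then '1' else '0']) []

-- str(int(not int(c))) on a '0'/'1' character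
def pvFlipBit (c : Char) : Char := if c = '1' then '0' else '1'

def operations_with_bytes_for_not (u_coll : List Int) (a_coll : List Int) (b_coll : List Int) (collection : String) : String :=
  let bytes_in_a := collection_into_bytes u_coll a_coll
  let bytes_in_b := collection_into_bytes u_coll b_coll
  -- for i in range(len(..)): total += str(int(not int(s[i]))); index i is always in range
  if collection = "a" then
    String.mk ((List.range bytes_in_a.length).foldl (fun total i => total ++ [pvFlipBit (bytes_in_a.getD i '0')]) [])
  else if collection = "b" then
    String.mk ((List.range bytes_in_b.length).foldl (fun total i => total ++ [pvFlipBit (bytes_in_b.getD i '0')]) [])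
  else
    ""

-- ===== PORT B =====
def operations_with_bytes_for_not_alt (u_coll : List Int) (a_coll : List Int) (b_coll : List Int) (collection : String) : String :=
  if collection = "a" then
    String.mk (u_coll.map (fun elem => if a_coll.contains elem then '0' else '1'))
  else if collection = "b" then
    String.mk (u_coll.map (fun elem => if b_coll.contains elem then '0' else '1'))
  else
    ""

-- ===== PRECONDITION & SPEC =====
def Spec_operations_with_bytes_for_not (u_coll : List Int) (a_coll : List Int) (b_coll : List Int) (collection : String) (out : String) : Prop := out = operations_with_bytes_for_not_alt u_coll a_coll b_coll collection
instance (u_coll : List Int) (a_coll : List Int) (b_coll : List Int) (collection : String) (out : String) : Decidable (Spec_operations_with_bytes_for_not u_coll a_coll b_coll collection out) := by unfold Spec_operations_with_bytes_for_not; infer_instance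

-- ===== CLAIM (what is proved, stated in full; the proofs are below) =====
def Claim_equal_operations_with_bytes_for_not : Prop := ∀ (u_coll : List Int) (a_coll : List Int) (b_coll : List Int) (collection : String), Dom_operations_with_bytes_for_not u_coll a_coll b_coll collection → Spec_operations_with_bytes_for_not u_coll a_coll b_coll collection (operations_with_bytes_for_not u_coll a_coll b_coll collection)

-- ===== LEMMAS AND PROOFS =====
theorem foldl_append_singleton {α β : Type} (f : α → β) (l : List α) (init : List β) :
    l.foldl (fun acc e => acc ++ [f e]) init = init ++ l.map f := by
  induction l generalizing init with
  | nil => simp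
  | cons x xs ih => simp [List.foldl, ih]

theorem cib_eq_map (u a : List Int) :
    collection_into_bytes u a = u.map (fun e => if a.contains e then '1' else '0') := by
  rw [collection_into_bytes, foldl_append_singleton, List.nil_append]

theorem range_fold_getD {α β : Type} (f : α → β) (l : List α) (d : α) (n : Nat) (hn : n ≤ l.length) :
    (List.range n).foldl (fun total i => total ++ [f (l.getD i d)]) [] = (l.take n).map f := by
  induction n with
  | zero => simp
  | succ m ih =>
      rw [List.range_succ, List.foldl_append, ih (Nat.le_of_succ_le hn)]
      have hm : m < l.length := hn
      rw [List.foldl_cons, List.foldl_nil, List.getD_eq_getElem l d hm,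
          List.take_add_one, List.getElem?_eq_getElem hm, Option.toList_some, List.map_append,
          List.map_cons, List.map_nil]

theorem negate_bits (u a : List Int) :
    (List.range (collection_into_bytes u a).length).foldl
      (fun total i => total ++ [pvFlipBit ((collection_into_bytes u a).getD i '0')]) []
      = u.map (fun e => if a.contains e then '0' else '1') := by
  rw [range_fold_getD pvFlipBit (collection_into_bytes u a) '0' _ (Nat.le_refl _),
      List.take_length, cib_eq_map, List.map_map]
  refine List.map_congr_left (fun e _ => ?_)
  by_cases h : a.contains e <;> simp [h, pvFlipBit]

-- ===== VERDICT (by name: the statement is the Claim_ definition above) =====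
theorem operations_with_bytes_for_not_spec : Claim_equal_operations_with_bytes_for_not := by
  intro u a b c _
  unfold Spec_operations_with_bytes_for_not
  simp only [operations_with_bytes_for_not, operations_with_bytes_for_not_alt]
  by_cases h1 : c = "a"
  · rw [if_pos h1, if_pos h1, negate_bits]
  · rw [if_neg h1, if_neg h1]
    by_cases h2 : c = "b"
    · rw [if_pos h2, if_pos h2, negate_bits]
    · rw [if_neg h2, if_neg h2]
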